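-- pv_equiv track=rewrite | github.com/alexbielen/allegro | allegro/search.py | pcs_to_asc
-- ===== SOURCE A (Python) =====
-- from typing import List
--
-- def pcs_to_asc(nums: List[int], start_note=0):
--     """
--     There's gotta be a better way to do this, but this works.
--     """
--     res = []
--     last = None
--     offset = 0
--     for n in nums:
--         if last:
--             if n < last:
--                 offset += 12
--             res.append(offset + n + start_note)
--         else:
--             res.append(n + start_note)
--
--         last = n
--
--     return res
-- ===== SOURCE B (Python) =====
-- from typing import List
--
-- def pcs_to_asc(nums: List[int], start_note=0):
--     offsets = [0]
--     for prev, cur in zip(nums, nums[1:]):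
--         offsets.append(offsets[-1] + (12 if cur < prev else 0))
--     return [n + start_note + off for n, off in zip(nums, offsets)]
-- ===== Notes on version B (the rewrite author's own statement) =====
-- stated objective: simpler
-- what changed: Replaced the single stateful loop with last/offset sentinels by two plain passes: a prefix-sum table of +12 octave offsets over adjacent pairs, then a zip that adds each offset to its pitch.
-- intended difference: On lists where a pitch class 0 is followed by further elements after (or at) a descent, A's truthy 'if last:' treats the previous value 0 as 'no previous note' and emits the next element without the accumulated +12 octave offset; B adds the accumulated offset there, which is the intended ascending conversion. — e.g. on pcs_to_asc([5, 0, 3], 0): A returns [5, 12, 3], B returns [5, 12, 15]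
import Mathlib
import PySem

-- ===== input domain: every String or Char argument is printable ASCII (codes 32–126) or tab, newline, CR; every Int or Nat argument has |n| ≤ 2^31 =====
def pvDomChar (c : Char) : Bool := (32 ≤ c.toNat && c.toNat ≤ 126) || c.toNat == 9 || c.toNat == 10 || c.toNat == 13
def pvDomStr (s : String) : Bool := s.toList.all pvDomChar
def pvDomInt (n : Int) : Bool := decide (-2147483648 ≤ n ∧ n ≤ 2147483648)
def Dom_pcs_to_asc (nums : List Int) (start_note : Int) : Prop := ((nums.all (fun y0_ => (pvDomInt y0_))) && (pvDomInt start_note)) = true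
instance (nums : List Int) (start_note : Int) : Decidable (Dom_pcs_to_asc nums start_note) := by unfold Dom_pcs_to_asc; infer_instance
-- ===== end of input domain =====

-- B replaces A's single stateful loop by a prefix-sum offset table plus a zip (simpler, same cost);
-- on the exceptional inputs described at D_ below, A and B intentionally differ.

-- ===== PORT A =====
-- step of A's for-loop: state = (res, last, offset); `if last:` is Python truthiness (last ≠ None and ≠ 0)
def pvStepA (start_note : Int) (st : List Int × Option Int × Int) (n : Int) : List Int × Option Int × Int :=
  match st with
  | (res, last, offset) =>
    match last with
    | some l =>
      if l ≠ 0 then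
        let offset := if n < l then offset + 12 else offset
        (res ++ [offset + n + start_note], some n, offset)
      else
        (res ++ [n + start_note], some n, offset)
    | none => (res ++ [n + start_note], some n, offset)

def pcs_to_asc (nums : List Int) (start_note : Int) : List Int :=
  (nums.foldl (pvStepA start_note) ([], none, 0)).1

-- ===== PORT B =====
-- Source B's offsets loop: appends offsets[-1] + (12 if cur < prev else 0) for each adjacent pair
def pvOffAux (t : Int) : List (Int × Int) → List Int
  | [] => []
  | p :: rest =>
    let t' := t + (if p.2 < p.1 then 12 else 0)
    t' :: pvOffAux t' rest

def pcs_to_asc_alt (nums : List Int) (start_note : Int) : List Int :=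
  let offsets := (0 : Int) :: pvOffAux 0 (nums.zip nums.tail)
  (nums.zip offsets).map (fun p => p.1 + start_note + p.2)

-- ===== PRECONDITION & SPEC =====
-- On lists where a pitch class 0 is followed by further elements after (or at) a descent, A's truthy
-- `if last:` treats the previous value 0 as 'no previous note' and emits the next element without the
-- accumulated +12 octave offset; B adds the accumulated offset there, the intended ascending conversion.
def D_pcs_to_asc (nums : List Int) (start_note : Int) : Prop :=
  ∃ i < nums.length, 1 ≤ i ∧ nums.getD (i - 1) 0 = 0 ∧
    ∃ k < i + 1, 1 ≤ k ∧ nums.getD k 0 < nums.getD (k - 1) 0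
instance (nums : List Int) (start_note : Int) : Decidable (D_pcs_to_asc nums start_note) := by
  unfold D_pcs_to_asc; infer_instance

def Spec_pcs_to_asc (nums : List Int) (start_note : Int) (out : List Int) : Prop :=
  ¬ D_pcs_to_asc nums start_note → out = pcs_to_asc_alt nums start_note
instance (nums : List Int) (start_note : Int) (out : List Int) : Decidable (Spec_pcs_to_asc nums start_note out) := by unfold Spec_pcs_to_asc; infer_instance

def pvDiffWitness_pcs_to_asc : List Int × Int := ([5, 0, 3], 0)
def pvDiffWitnessOut_pcs_to_asc : (List Int) × (List Int) := ([5, 12, 3], [5, 12, 15])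

-- ===== CLAIM (what is proved, stated in full; the proofs are below) =====
def Claim_unchanged_pcs_to_asc : Prop := ∀ (nums : List Int) (start_note : Int), Dom_pcs_to_asc nums start_note → Spec_pcs_to_asc nums start_note (pcs_to_asc nums start_note)
def Claim_changed_pcs_to_asc : Prop := Dom_pcs_to_asc (pvDiffWitness_pcs_to_asc.1) (pvDiffWitness_pcs_to_asc.2) ∧ D_pcs_to_asc (pvDiffWitness_pcs_to_asc.1) (pvDiffWitness_pcs_to_asc.2) ∧ pcs_to_asc (pvDiffWitness_pcs_to_asc.1) (pvDiffWitness_pcs_to_asc.2) = pvDiffWitnessOut_pcs_to_asc.1 ∧ pcs_to_asc_alt (pvDiffWitness_pcs_to_asc.1) (pvDiffWitness_pcs_to_asc.2) = pvDiffWitnessOut_pcs_to_asc.2 ∧ pvDiffWitnessOut_pcs_to_asc.1 ≠ pvDiffWitnessOut_pcs_to_asc.2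
def Claim_exact_pcs_to_asc : Prop := ∀ (nums : List Int) (start_note : Int), Dom_pcs_to_asc nums start_note → D_pcs_to_asc nums start_note → pcs_to_asc nums start_note ≠ pcs_to_asc_alt nums start_note

-- ===== LEMMAS AND PROOFS =====

-- A's loop tail from state (some l, off), as a structural recursion
def pvG (start_note l off : Int) : List Int → List Int
  | [] => []
  | n :: rest =>
    if l ≠ 0 then
      let off' := if n < l then off + 12 else off
      (off' + n + start_note) :: pvG start_note n off' rest
    else
      (n + start_note) :: pvG start_note n off rest

theorem pvFoldA (start_note : Int) : ∀ (rest : List Int) (res : List Int) (l off : Int),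
    (rest.foldl (pvStepA start_note) (res, some l, off)).1 = res ++ pvG start_note l off rest := by
  intro rest
  induction rest with
  | nil => intro res l off; simp [pvG]
  | cons n rs ih =>
    intro res l off
    by_cases hl : l ≠ 0
    · by_cases hn : n < l <;>
        simp [pvStepA, pvG, hl, hn, ih, List.append_assoc]
    · simp at hl
      simp [pvStepA, pvG, hl, ih, List.append_assoc]

-- B's tail from previous value l and running total t, as a structural recursion
def pvB (start_note l t : Int) : List Int → List Int
  | [] => []
  | n :: rest =>
    let t' := t + (if n < l then 12 else 0)
    (n + start_note + t') :: pvB start_note n t' rest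

theorem pvB_eq (start_note : Int) : ∀ (rest : List Int) (l t : Int),
    (rest.zip (pvOffAux t ((l :: rest).zip rest))).map (fun p => p.1 + start_note + p.2)
      = pvB start_note l t rest := by
  intro rest
  induction rest with
  | nil => intro l t; simp [pvB]
  | cons n rs ih => intro l t; simp [pvOffAux, pvB, ih]

-- equality tracker: A's tail equals B's tail from shared state (l, t) iff pvOk holds
def pvOk (l t : Int) : List Int → Bool
  | [] => true
  | n :: rest =>
    let t' := t + (if n < l then 12 else 0)
    (decide (¬ l = 0) || decide (t' = 0)) && pvOk n t' rest

theorem pvGetD_zero_mem_dropLast (xs : List Int) (p : Nat) (hp : p < xs.length - 1)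
    (hz : xs.getD p 0 = 0) : (0 : Int) ∈ xs.dropLast := by
  have hp' : p < xs.dropLast.length := by simp [List.length_dropLast]; omega
  have e : xs.dropLast[p]'hp' = xs.getD p 0 := by
    rw [List.getElem_dropLast hp', List.getD_eq_getElem xs 0 (by omega)]
  rw [hz] at e
  exact e ▸ List.getElem_mem hp'

theorem pvMem_dropLast_getD (xs : List Int) (h : (0 : Int) ∈ xs.dropLast) :
    ∃ p, p < xs.length - 1 ∧ xs.getD p 0 = 0 := by
  rcases List.getElem_of_mem h with ⟨p, hp, hpe⟩
  have hp' : p < xs.length - 1 := by simpa using hp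
  refine ⟨p, hp', ?_⟩
  rw [List.getD_eq_getElem xs 0 (by omega), ← List.getElem_dropLast hp, hpe]

theorem pvMain (start_note : Int) : ∀ (rest : List Int) (l t : Int), 0 ≤ t →
    (pvG start_note l t rest = pvB start_note l t rest ↔ pvOk l t rest = true) := by
  intro rest
  induction rest with
  | nil => intro l t _; simp [pvG, pvB, pvOk]
  | cons n rs ih =>
    intro l t ht
    by_cases hl : l = 0
    · subst hl
      have hG : pvG start_note 0 t (n :: rs) = (n + start_note) :: pvG start_note n t rs := by
        simp [pvG]
      by_cases hn : n < (0 : Int)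
      · have hB : pvB start_note 0 t (n :: rs)
            = (n + start_note + (t + 12)) :: pvB start_note n (t + 12) rs := by
          simp [pvB, hn]
        have hOk : pvOk 0 t (n :: rs) = false := by
          simp [pvOk, hn, show ¬(t + (12 : Int) = 0) by omega]
        rw [hG, hB, hOk]
        simp only [Bool.false_eq_true, iff_false]
        intro hEq
        have h1 := ((List.cons.injEq _ _ _ _).mp hEq).1
        omega
      · have hB : pvB start_note 0 t (n :: rs)
            = (n + start_note + t) :: pvB start_note n t rs := by
          simp [pvB, hn]
        by_cases ht0 : t = 0
        · subst ht0
          have hOk : pvOk 0 0 (n :: rs) = pvOk n 0 rs := by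
            simp [pvOk, hn]
          rw [hG, hB, hOk]
          simp only [List.cons.injEq, add_zero]
          rw [ih n 0 (le_refl 0)]
          constructor
          · rintro ⟨-, h2⟩; exact h2
          · intro h; exact ⟨by simp, h⟩
        · have hOk : pvOk 0 t (n :: rs) = false := by
            simp [pvOk, hn, ht0]
          rw [hG, hB, hOk]
          simp only [Bool.false_eq_true, iff_false]
          intro hEq
          have h1 := ((List.cons.injEq _ _ _ _).mp hEq).1
          omega
    · by_cases hn : n < l
      · have hG : pvG start_note l t (n :: rs)
            = (t + 12 + n + start_note) :: pvG start_note n (t + 12) rs := by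
          simp [pvG, hl, hn]
        have hB : pvB start_note l t (n :: rs)
            = (n + start_note + (t + 12)) :: pvB start_note n (t + 12) rs := by
          simp [pvB, hn]
        have hOk : pvOk l t (n :: rs) = pvOk n (t + 12) rs := by
          simp [pvOk, hl, hn]
        rw [hG, hB, hOk]
        simp only [List.cons.injEq]
        rw [ih n (t + 12) (by omega)]
        constructor
        · rintro ⟨-, h2⟩; exact h2
        · intro h; exact ⟨by ring, h⟩
      · have hG : pvG start_note l t (n :: rs)
            = (t + n + start_note) :: pvG start_note n t rs := by
          simp [pvG, hl, hn]
        have hB : pvB start_note l t (n :: rs)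
            = (n + start_note + t) :: pvB start_note n t rs := by
          simp [pvB, hn]
        have hOk : pvOk l t (n :: rs) = pvOk n t rs := by
          simp [pvOk, hl, hn]
        rw [hG, hB, hOk]
        simp only [List.cons.injEq]
        rw [ih n t ht]
        constructor
        · rintro ⟨-, h2⟩; exact h2
        · intro h; exact ⟨by ring, h⟩

-- once the running total is positive, A's tail diverges from B's exactly when another zero is a previous value
theorem pvOk_pos : ∀ (rest : List Int) (l t : Int), 0 < t →
    (pvOk l t rest = false ↔ (0 : Int) ∈ (l :: rest).dropLast) := by
  intro rest
  induction rest with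
  | nil => intro l t ht; simp [pvOk]
  | cons n rs ih =>
    intro l t ht
    have ht' : 0 < t + (if n < l then 12 else 0) := by split <;> omega
    by_cases hl : l = 0
    · subst hl
      simp [pvOk, show ¬ (t + (if n < (0:Int) then 12 else 0) = 0) by omega]
    · simp [pvOk, hl, show ¬ (t + (if n < l then 12 else 0) = 0) by omega, ih n _ ht',
        List.dropLast_cons_of_ne_nil (List.cons_ne_nil n rs),
        show ¬ (0 : Int) = l from fun h => hl h.symm]

-- any witness of D_ puts a 0 among the previous values, i.e. in dropLast
theorem pvD_mem_dropLast (nums : List Int) (s : Int) :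
    D_pcs_to_asc nums s → (0 : Int) ∈ nums.dropLast := by
  rintro ⟨i, hi, h1, hz, -⟩
  exact pvGetD_zero_mem_dropLast nums (i - 1) (by omega) hz

-- structural decomposition of D_
theorem pvD_decomp (l n : Int) (rs : List Int) (s : Int) :
    D_pcs_to_asc (l :: n :: rs) s ↔
      (n < l ∧ (0 : Int) ∈ (l :: n :: rs).dropLast) ∨ D_pcs_to_asc (n :: rs) s := by
  constructor
  · rintro ⟨i, hi, h1, hz, k, hk, hk1, hd⟩
    by_cases hk2 : k = 1
    · subst hk2
      exact Or.inl ⟨by simpa using hd,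
        pvGetD_zero_mem_dropLast _ (i - 1) (by simp at hi ⊢; omega) hz⟩
    · right
      refine ⟨i - 1, by simp at hi ⊢; omega, by omega, ?_, k - 1, by omega, by omega, ?_⟩
      · have : (n :: rs).getD (i - 1 - 1) 0 = (l :: n :: rs).getD (i - 1) 0 := by
          rcases Nat.exists_eq_add_of_le (show 2 ≤ i by omega) with ⟨j, rfl⟩
          simp [Nat.add_comm]
        rw [this, hz]
      · have e1 : (n :: rs).getD (k - 1) 0 = (l :: n :: rs).getD k 0 := by
          rcases Nat.exists_eq_add_of_le (show 2 ≤ k by omega) with ⟨j, rfl⟩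
          simp [Nat.add_comm]
        have e2 : (n :: rs).getD (k - 1 - 1) 0 = (l :: n :: rs).getD (k - 1) 0 := by
          rcases Nat.exists_eq_add_of_le (show 2 ≤ k by omega) with ⟨j, rfl⟩
          simp [Nat.add_comm]
        rw [e1, e2]; exact hd
  · rintro (⟨hd, hz⟩ | ⟨i, hi, h1, hz, k, hk, hk1, hdd⟩)
    · rcases pvMem_dropLast_getD _ hz with ⟨p, hp, hpz⟩
      refine ⟨p + 1, by simp at hp ⊢; omega, by omega, by simpa using hpz,
        1, by omega, by omega, by simpa using hd⟩
    · refine ⟨i + 1, by simp at hi ⊢; omega, by omega, ?_,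
        k + 1, by omega, by omega, ?_⟩
      · have e : (l :: n :: rs).getD (i + 1 - 1) 0 = (n :: rs).getD (i - 1) 0 := by
          rcases Nat.exists_eq_add_of_le h1 with ⟨j, rfl⟩
          simp [Nat.add_comm]
        rw [e]; exact hz
      have e1 : (l :: n :: rs).getD (k + 1) 0 = (n :: rs).getD k 0 := by simp
      have e2 : (l :: n :: rs).getD (k + 1 - 1) 0 = (n :: rs).getD (k - 1) 0 := by
        rcases Nat.exists_eq_add_of_le hk1 with ⟨j, rfl⟩
        simp [Nat.add_comm]
      rw [e1, e2]; exact hdd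

theorem pvD_nil (s : Int) : ¬ D_pcs_to_asc [] s := by
  rintro ⟨i, hi, h1, -⟩; simp at hi

theorem pvD_single (l s : Int) : ¬ D_pcs_to_asc [l] s := by
  rintro ⟨i, hi, h1, -⟩; simp at hi; omega

-- bridge: pvOk from the initial state fails exactly on D_
theorem pvOk_iff_D : ∀ (rest : List Int) (l s : Int),
    (pvOk l 0 rest = false ↔ D_pcs_to_asc (l :: rest) s) := by
  intro rest
  induction rest with
  | nil => intro l s; simp [pvOk, pvD_single l s]
  | cons n rs ih =>
    intro l s
    rw [pvD_decomp l n rs s]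
    by_cases hn : n < l
    · by_cases hl : l = 0
      · subst hl
        have hOk : pvOk 0 0 (n :: rs) = false := by
          simp [pvOk, hn]
        rw [hOk]
        simp only [true_iff]
        exact Or.inl ⟨hn, by simp⟩
      · have hOk : pvOk l 0 (n :: rs) = pvOk n 12 rs := by
          simp [pvOk, hl, hn]
        rw [hOk, pvOk_pos rs n 12 (by omega)]
        constructor
        · intro h
          exact Or.inl ⟨hn, by
            simp [List.dropLast_cons_of_ne_nil (List.cons_ne_nil n rs),
              show ¬ (0 : Int) = l from fun he => hl he.symm, h]⟩
        · rintro (⟨-, hz⟩ | hD)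
          · simpa [List.dropLast_cons_of_ne_nil (List.cons_ne_nil n rs),
              show ¬ (0 : Int) = l from fun he => hl he.symm] using hz
          · exact pvD_mem_dropLast (n :: rs) s hD
    · have hOk : pvOk l 0 (n :: rs) = pvOk n 0 rs := by
        simp [pvOk, hn]
      rw [hOk, ih n s]
      constructor
      · exact Or.inr
      · rintro (⟨hd, -⟩ | h)
        · exact absurd hd hn
        · exact h

-- both ports on a nonempty list, in tail form
theorem pvA_cons (h s : Int) (t : List Int) :
    pcs_to_asc (h :: t) s = (h + s) :: pvG s h 0 t := by
  show (List.foldl (pvStepA s) ([], none, 0) (h :: t)).1 = _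
  rw [List.foldl_cons, show pvStepA s ([], none, 0) h = ([h + s], some h, 0) by simp [pvStepA]]
  rw [pvFoldA]
  rfl

theorem pvB_cons (h s : Int) (t : List Int) :
    pcs_to_asc_alt (h :: t) s = (h + s) :: pvB s h 0 t := by
  show ((h :: t).zip ((0 : Int) :: pvOffAux 0 ((h :: t).zip (h :: t).tail))).map
      (fun p => p.1 + s + p.2) = _
  simp only [List.tail_cons, List.zip_cons_cons, List.map_cons]
  rw [pvB_eq]
  simp

-- ===== VERDICT (by name: the statement is the Claim_ definition above) =====
theorem pcs_to_asc_spec : Claim_unchanged_pcs_to_asc := by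
  intro nums start_note _ hD
  cases nums with
  | nil => rfl
  | cons h t =>
    rw [pvA_cons, pvB_cons]
    have hok : pvOk h 0 t = true := by
      cases hc : pvOk h 0 t
      · exact absurd ((pvOk_iff_D t h start_note).mp hc) hD
      · rfl
    rw [(pvMain start_note t h 0 (le_refl 0)).mpr hok]

theorem pcs_to_asc_changed : Claim_changed_pcs_to_asc := by
  unfold Claim_changed_pcs_to_asc; decide

theorem pcs_to_asc_tight : Claim_exact_pcs_to_asc := by
  intro nums start_note _ hD
  cases nums with
  | nil => exact absurd hD (pvD_nil start_note)
  | cons h t =>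
    rw [pvA_cons, pvB_cons]
    intro hEq
    have htails := ((List.cons.injEq _ _ _ _).mp hEq).2
    have hok := (pvMain start_note t h 0 (le_refl 0)).mp htails
    have hfail := (pvOk_iff_D t h start_note).mpr hD
    rw [hok] at hfail
    exact Bool.noConfusion hfail
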